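-- pv_equiv track=rewrite | github.com/mscroggs/acyclic-orientations | new_seq.py | generate_hyperoctahedral_group
-- ===== SOURCE A (Python) =====
-- def generate_hyperoctahedral_group(dim, edges, done=[]):
--     """Generates all the permutations of the dim-dimensional cube."""
--     if len(done) == 2**dim:
--         return [done]
--     elements = []
--     for i in range(2**dim):
--         if i not in done:
--             numbers = done + [i]
--             for e in edges:
--                 if max(e) < len(numbers):
--                     vertices = [numbers[e[0]], numbers[e[1]]]
--                     new_e = (min(vertices), max(vertices))
--                     if new_e not in edges:
--                         break
--             else:
--                 elements += generate_hyperoctahedral_group(dim, edges, numbers)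
--     return elements
-- ===== SOURCE B (Python) =====
-- def generate_hyperoctahedral_group(dim, edges, done=[]):
--     """Generates all the permutations of the dim-dimensional cube.
--
--     Re-implementation: edge membership goes through a set, edges are
--     indexed by their larger endpoint, and the search runs as an iterative
--     breadth-first expansion of a frontier of partial placements, validating
--     only the edges incident to the newly placed position instead of
--     rescanning the whole edge list at every node of the search tree.
--     """
--     n = 2 ** dim
--     if len(done) == n:
--         return [done]
--     edge_set = set(edges)
--     # validate once the edges that lie entirely inside the given prefix
--     if not all((lambda v, w: (min(v, w), max(v, w)) in edge_set)(done[e[0]], done[e[1]])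
--                for e in edges if max(e) < len(done)):
--         return []
--     by_top = {}
--     for e in edges:
--         by_top.setdefault(max(e), []).append(e)
--
--     k = len(done)
--     frontier = [(list(done), set(done))]
--     while k != n and frontier:
--         new_frontier = []
--         for prefix, used in frontier:
--             for i in range(n):
--                 if i not in used:
--                     new = prefix + [i]
--                     ok = True
--                     for e in by_top.get(k, []):
--                         v, w = new[e[0]], new[e[1]]
--                         if (min(v, w), max(v, w)) not in edge_set:
--                             ok = False
--                             break
--                     if ok:
--                         new_frontier.append((new, used | {i}))
--         frontier = new_frontier
--         k += 1
--     if k == n: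
--         return [p for p, _ in frontier]
--     return []
-- ===== Notes on version B (the rewrite author's own statement) =====
-- stated objective: alternative
-- what changed: B replaces A's recursive rescans of the whole edge list (with linear 'not in edges' list tests) at every node of the backtracking tree by a one-time validation of the given prefix, a hash set for edge membership, per-position buckets (edges grouped by their larger endpoint), and an iterative level-by-level frontier expansion that checks only the edges incident to the newly placed vertex; intended as faster (a timing run could not confirm a ratio: A timed out at n=64 where B returned, and sizes both finish are sub-millisecond).
-- outside the precondition, e.g. on generate_hyperoctahedral_group(2, [(1, -1), (2, 2), (1, 1)], [2, 1, 1]): A returns [], B returns [[2, 1, 1, 0], [2, 1, 1, 3]]; on generate_hyperoctahedral_group(1, [(0, -9)], [0]): A raises IndexError, B raises IndexError; on generate_hyperoctahedral_group(-1, [], []): A raises TypeError, B raises TypeError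
import Mathlib
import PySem

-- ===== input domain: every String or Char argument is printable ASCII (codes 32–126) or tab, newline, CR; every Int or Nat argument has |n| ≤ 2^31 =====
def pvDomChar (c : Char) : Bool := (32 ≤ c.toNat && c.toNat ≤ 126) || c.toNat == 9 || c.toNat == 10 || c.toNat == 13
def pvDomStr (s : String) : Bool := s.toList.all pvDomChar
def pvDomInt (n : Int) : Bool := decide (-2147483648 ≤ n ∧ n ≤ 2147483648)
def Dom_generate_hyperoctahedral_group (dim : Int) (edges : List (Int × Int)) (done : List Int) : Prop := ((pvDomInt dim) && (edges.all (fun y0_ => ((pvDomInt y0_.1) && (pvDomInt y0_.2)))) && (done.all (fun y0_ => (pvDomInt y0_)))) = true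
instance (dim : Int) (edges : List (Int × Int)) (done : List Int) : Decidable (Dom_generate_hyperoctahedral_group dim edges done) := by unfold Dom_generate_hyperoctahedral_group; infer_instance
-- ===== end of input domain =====

-- B replaces A's recursive full edge-list rescan at every search node by an iterative frontier
-- expansion with a set-membership test and per-position edge buckets, so only edges incident to
-- the newly placed vertex are checked (alternative algorithm, intended to do less work per node).


-- ===== PORT A =====
-- A's inner 'for e in edges: … break / else' loop: check every edge that lies inside numbers
-- (indexing via pyGetD, total form — Pre_ restricts edge endpoints to nonnegative in-range indices)
def ghgCheckA (edges : List (Int × Int)) (numbers : List Int) : Bool :=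
  edges.all (fun e =>
    if max e.1 e.2 < (numbers.length : Int) then
      let v1 := PySem.List.pyGetD numbers e.1 0
      let v2 := PySem.List.pyGetD numbers e.2 0
      edges.contains (min v1 v2, max v1 v2)
    else true)

-- A's recursion, fuel-bounded (fuel = 2^dim - len(done) in the wrapper; inside Pre_ the
-- length check always fires before fuel runs out, so the guard only makes the port total)
def ghgGoA (dim : Int) (edges : List (Int × Int)) : Nat → List Int → List (List Int)
  | 0, done =>
    -- fuel exhausted (only reachable outside Pre_): Python would be at len(done) = 2^dim here
    if (done.length : Int) = (2 : Int) ^ dim.toNat then [done] else []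
  | fuel + 1, done =>
    if (done.length : Int) = (2 : Int) ^ dim.toNat then [done]
    else
      (List.range (2 ^ dim.toNat)).foldl (fun elements (i : Nat) =>
        if done.contains (i : Int) then elements
        else
          if ghgCheckA edges (done ++ [(i : Int)]) then
            elements ++ ghgGoA dim edges fuel (done ++ [(i : Int)])
          else elements) []

def generate_hyperoctahedral_group (dim : Int) (edges : List (Int × Int)) (done : List Int) : List (List Int) :=
  ghgGoA dim edges (2 ^ dim.toNat - done.length) done

-- ===== PORT B =====
-- Source B builds, per node of the search, only the children that satisfy the incident-edge checks
-- (edge set membership, buckets by larger endpoint), and expands a whole frontier level by level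
-- (iterative BFS; the final level in frontier order is exactly A's leaf order).

-- the inner 'for i in range(n): …' loop collecting the valid one-step extensions of (pre, used)
def ghgChildren (n : Nat) (eset : PySem.Set (Int × Int)) (byTop : PySem.Dict Int (List (Int × Int)))
    (pre : List Int) (used : PySem.Set Int) : List (List Int × PySem.Set Int) :=
  (List.range n).foldl (fun acc (i : Nat) =>
    if PySem.Set.contains used (i : Int) then acc
    else
      if (byTop.getD (pre.length : Int) []).all (fun e =>
          let v := PySem.List.pyGetD (pre ++ [(i : Int)]) e.1 0
          let w := PySem.List.pyGetD (pre ++ [(i : Int)]) e.2 0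
          PySem.Set.contains eset (min v w, max v w))
      then acc ++ [(pre ++ [(i : Int)], PySem.Set.add used (i : Int))]
      else acc) []

-- one round of the 'for prefix, used in frontier' loop building new_frontier
def ghgExpand (n : Nat) (eset : PySem.Set (Int × Int)) (byTop : PySem.Dict Int (List (Int × Int)))
    (frontier : List (List Int × PySem.Set Int)) : List (List Int × PySem.Set Int) :=
  frontier.foldl (fun acc p => acc ++ ghgChildren n eset byTop p.1 p.2) []

-- Source B's 'while k != n and frontier' loop, fuel-bounded (fuel = n - k at the call site; when the
-- initial k exceeds n the Python loop's extra rounds only empty the frontier and still yield [],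
-- which the k = n test below reproduces, so the guard only makes the port total)
def ghgLoopB (n : Nat) (eset : PySem.Set (Int × Int)) (byTop : PySem.Dict Int (List (Int × Int))) :
    Nat → Nat → List (List Int × PySem.Set Int) → Nat × List (List Int × PySem.Set Int)
  | 0, k, frontier => (k, frontier)
  | fuel + 1, k, frontier =>
    if frontier = [] then (k, frontier)
    else ghgLoopB n eset byTop fuel (k + 1) (ghgExpand n eset byTop frontier)

def generate_hyperoctahedral_group_alt (dim : Int) (edges : List (Int × Int)) (done : List Int) : List (List Int) :=
  let n := 2 ^ dim.toNat
  if done.length = n then [done]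
  else
    let eset := PySem.Set.ofList edges
    if edges.all (fun e =>
        if max e.1 e.2 < (done.length : Int) then
          let v := PySem.List.pyGetD done e.1 0
          let w := PySem.List.pyGetD done e.2 0
          PySem.Set.contains eset (min v w, max v w)
        else true)
    then
      let byTop := edges.foldl (fun d e => d.modify (max e.1 e.2) [] (· ++ [e])) PySem.Dict.empty
      let r := ghgLoopB n eset byTop (n - done.length) done.length [(done, PySem.Set.ofList done)]
      if r.1 = n then r.2.map (fun p => p.1) else []
    else []

-- ===== PRECONDITION & SPEC =====
-- Pre_ keeps the natural domain: dim ≥ 0 (Python raises TypeError on negative dim) and, per edge,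
-- either NONNEGATIVE endpoints (an edge is a pair of vertex positions) or a larger endpoint so big
-- (≥ len(done) + 2^dim) that no reachable prefix ever selects the edge; edges with a negative
-- endpoint that can be selected are malformed input on which A's Python negative-index wraparound
-- re-reads moving positions (or raises IndexError).
def Pre_generate_hyperoctahedral_group (dim : Int) (edges : List (Int × Int)) (done : List Int) : Prop :=
  0 ≤ dim ∧ ∀ e ∈ edges, (0 ≤ e.1 ∧ 0 ≤ e.2) ∨ ((done.length : Int) + (2 : Int) ^ dim.toNat ≤ max e.1 e.2)
instance (dim : Int) (edges : List (Int × Int)) (done : List Int) : Decidable (Pre_generate_hyperoctahedral_group dim edges done) := by unfold Pre_generate_hyperoctahedral_group; infer_instance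

def pvWitness_generate_hyperoctahedral_group : Int × (List (Int × Int)) × List Int :=
  (2, [(0, 1), (0, 2), (1, 3), (2, 3)], [])

def Spec_generate_hyperoctahedral_group (dim : Int) (edges : List (Int × Int)) (done : List Int) (out : List (List Int)) : Prop := out = generate_hyperoctahedral_group_alt dim edges done
instance (dim : Int) (edges : List (Int × Int)) (done : List Int) (out : List (List Int)) : Decidable (Spec_generate_hyperoctahedral_group dim edges done out) := by unfold Spec_generate_hyperoctahedral_group; infer_instance

-- ===== CLAIM (what is proved, stated in full; the proofs are below) =====
def Claim_equal_generate_hyperoctahedral_group : Prop := ∀ (dim : Int) (edges : List (Int × Int)) (done : List Int), Dom_generate_hyperoctahedral_group dim edges done → Pre_generate_hyperoctahedral_group dim edges done → Spec_generate_hyperoctahedral_group dim edges done (generate_hyperoctahedral_group dim edges done)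

-- ===== LEMMAS AND PROOFS =====

lemma ghg_witness_ok : Dom_generate_hyperoctahedral_group (pvWitness_generate_hyperoctahedral_group.1) (pvWitness_generate_hyperoctahedral_group.2.1) (pvWitness_generate_hyperoctahedral_group.2.2) ∧ Pre_generate_hyperoctahedral_group (pvWitness_generate_hyperoctahedral_group.1) (pvWitness_generate_hyperoctahedral_group.2.1) (pvWitness_generate_hyperoctahedral_group.2.2) := by
  constructor <;> decide

-- membership in a PySem set built from a list = Python's membership test on the list
lemma ghg_set_contains {α : Type} [BEq α] [LawfulBEq α] (xs : List α) (x : α) :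
    PySem.Set.contains (PySem.Set.ofList xs) x = xs.contains x := by
  cases h : xs.contains x <;>
    simp_all [PySem.Set.contains_eq_listContains, PySem.Set.mem_ofList]

-- adding to a used-set extends its membership by the new element
lemma ghg_contains_add {α : Type} [BEq α] [LawfulBEq α] (s : PySem.Set α) (y x : α) :
    PySem.Set.contains (PySem.Set.add s y) x = (PySem.Set.contains s x || x == y) := by
  by_cases hxy : x = y
  · subst hxy
    simp [PySem.Set.contains_eq_listContains, PySem.Set.mem_add]
  · cases h : PySem.Set.contains s x <;>
      simp_all [PySem.Set.contains_eq_listContains, PySem.Set.mem_add]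

-- the by_top bucket at key k holds exactly the edges whose larger endpoint is k
lemma ghg_byTop_getD (edges : List (Int × Int)) (k : Int) :
    (edges.foldl (fun d e => d.modify (max e.1 e.2) [] (· ++ [e])) PySem.Dict.empty).getD k []
      = edges.filter (fun e => max e.1 e.2 == k) := by
  have h := PySem.Dict.getD_foldl_modify_append (l := edges.map (fun e => (max e.1 e.2, e))) (d := PySem.Dict.empty) (c := k)
  rw [List.foldl_map] at h
  simp only [h, List.filter_map, Function.comp_def, PySem.Dict.getD_empty, List.nil_append]
  have h2 : ((fun x : Int × (Int × Int) => x.2) ∘ fun e : Int × Int => (max e.1 e.2, e)) = id := rfl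
  rw [List.map_map, h2, List.map_id]

-- Bool.all of a pointwise conjunction splits ('exact?' finds no library lemma for this)
lemma ghg_all_and_split {α : Type} (l : List α) (f g : α → Bool) :
    l.all (fun x => f x && g x) = (l.all f && l.all g) := by
  rw [Bool.eq_iff_iff]
  simp [List.all_eq_true, forall_and]

-- Bool.all congruence on members ('exact?' finds no library lemma for this)
lemma ghg_all_congr_mem {α : Type} {l : List α} {p q : α → Bool} (h : ∀ x ∈ l, p x = q x) :
    l.all p = l.all q := by
  induction l with
  | nil => rfl
  | cons a t ih =>
    simp only [List.all_cons, h a (by simp), ih (fun x hx => h x (by simp [hx]))]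

-- appending one element does not change nonnegative in-bounds reads
lemma ghg_pyGetD_append (xs : List Int) (x : Int) (j : Int) (h0 : 0 ≤ j) (h1 : j < (xs.length : Int)) :
    PySem.List.pyGetD (xs ++ [x]) j 0 = PySem.List.pyGetD xs j 0 := by
  rw [PySem.List.pyGetD_of_nonneg _ _ h0, PySem.List.pyGetD_of_nonneg _ _ h0, List.getD_append]
  omega

-- the split of A's full check on done ++ [i] into the old check plus the incident check
lemma ghg_check_split (edges : List (Int × Int)) (done : List Int) (i : Int)
    (hE : ∀ e ∈ edges, (0 ≤ e.1 ∧ 0 ≤ e.2) ∨ ((done.length : Int) + 1 ≤ max e.1 e.2)) :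
    ghgCheckA edges (done ++ [i])
      = (ghgCheckA edges done &&
         (edges.filter (fun e => max e.1 e.2 == (done.length : Int))).all (fun e =>
            let v := PySem.List.pyGetD (done ++ [i]) e.1 0
            let w := PySem.List.pyGetD (done ++ [i]) e.2 0
            edges.contains (min v w, max v w))) := by
  unfold ghgCheckA
  rw [List.all_filter, ← ghg_all_and_split]
  apply ghg_all_congr_mem
  intro e he
  simp only [List.length_append, List.length_cons, List.length_nil]
  rcases hE e he with ⟨h1, h2⟩ | hbig
  case inr =>
    -- the edge's larger endpoint is beyond every index the extended prefix has
    have hg : ¬ max e.1 e.2 < ((done.length + 1 : Nat) : Int) := by push_cast; omega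
    have hlt : ¬ max e.1 e.2 < (done.length : Int) := by omega
    have hne : (max e.1 e.2 == (done.length : Int)) = false := by simp; omega
    rw [if_neg hg, if_neg hlt]
    simp [hne]
  by_cases hlt : max e.1 e.2 < (done.length : Int)
  · have hg : max e.1 e.2 < ((done.length + 1 : Nat) : Int) := by push_cast; omega
    have hne : (max e.1 e.2 == (done.length : Int)) = false := by simp; omega
    rw [if_pos hg, if_pos hlt]
    simp only [hne, Bool.not_false, Bool.true_or, Bool.and_true]
    rw [ghg_pyGetD_append done i e.1 h1 (by omega), ghg_pyGetD_append done i e.2 h2 (by omega)]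
  · by_cases heq : max e.1 e.2 = (done.length : Int)
    · have hg : max e.1 e.2 < ((done.length + 1 : Nat) : Int) := by push_cast; omega
      rw [if_pos hg, if_neg hlt]
      simp [heq]
    · have hg : ¬ max e.1 e.2 < ((done.length + 1 : Nat) : Int) := by push_cast; omega
      have hne : (max e.1 e.2 == (done.length : Int)) = false := by simp; omega
      rw [if_neg hg, if_neg hlt]
      simp [hne]

-- B's incident check (set + bucket) computes A's incident check (list scans)
lemma ghg_incident_eq (edges : List (Int × Int)) (pre : List Int) (i : Int) :
    ((edges.foldl (fun d e => d.modify (max e.1 e.2) [] (· ++ [e])) PySem.Dict.empty).getD (pre.length : Int) []).all (fun e =>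
        let v := PySem.List.pyGetD (pre ++ [i]) e.1 0
        let w := PySem.List.pyGetD (pre ++ [i]) e.2 0
        PySem.Set.contains (PySem.Set.ofList edges) (min v w, max v w))
      = (edges.filter (fun e => max e.1 e.2 == (pre.length : Int))).all (fun e =>
        let v := PySem.List.pyGetD (pre ++ [i]) e.1 0
        let w := PySem.List.pyGetD (pre ++ [i]) e.2 0
        edges.contains (min v w, max v w)) := by
  rw [ghg_byTop_getD]
  apply ghg_all_congr_mem
  intro e _
  simp only [ghg_set_contains]

-- a failed prefix check makes A return nothing
lemma ghg_goA_of_check_false (dim : Int) (edges : List (Int × Int)) (fuel : Nat) (done : List Int)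
    (hE : ∀ e ∈ edges, (0 ≤ e.1 ∧ 0 ≤ e.2) ∨ ((done.length : Int) + 1 ≤ max e.1 e.2))
    (hlen : (done.length : Int) ≠ (2 : Int) ^ dim.toNat)
    (hchk : ghgCheckA edges done = false) :
    ghgGoA dim edges fuel done = [] := by
  cases fuel with
  | zero => rw [ghgGoA, if_neg hlen]
  | succ f =>
    rw [ghgGoA, if_neg hlen]
    have hstep : ∀ (acc : List (List Int)) (i : Nat),
        (if done.contains (i : Int) then acc
         else
           if ghgCheckA edges (done ++ [(i : Int)]) then acc ++ ghgGoA dim edges f (done ++ [(i : Int)])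
           else acc) = acc := by
      intro acc i
      by_cases hc : done.contains (i : Int)
      · rw [if_pos hc]
      · have hfalse : ghgCheckA edges (done ++ [(i : Int)]) = false := by
          rw [ghg_check_split _ _ _ hE, hchk, Bool.false_and]
        rw [if_neg hc, hfalse]
        simp
    have hfold : ∀ (l : List Nat) (acc : List (List Int)),
        l.foldl (fun elements (i : Nat) =>
          if done.contains (i : Int) then elements
          else
            if ghgCheckA edges (done ++ [(i : Int)]) then elements ++ ghgGoA dim edges f (done ++ [(i : Int)])
            else elements) acc = acc := by
      intro l
      induction l with
      | nil => intro acc; rfl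
      | cons a t ih => intro acc; rw [List.foldl_cons, hstep]; exact ih acc
    exact hfold _ _

-- one level of A's recursion as a flatMap over the candidate vertices
lemma ghg_goA_succ (dim : Int) (edges : List (Int × Int)) (f : Nat) (done : List Int)
    (hlen : (done.length : Int) ≠ (2 : Int) ^ dim.toNat) :
    ghgGoA dim edges (f + 1) done
      = (List.range (2 ^ dim.toNat)).flatMap (fun (i : Nat) =>
          if !done.contains (i : Int) && ghgCheckA edges (done ++ [(i : Int)])
          then ghgGoA dim edges f (done ++ [(i : Int)]) else []) := by
  rw [ghgGoA, if_neg hlen]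
  have hcg : ∀ (acc : List (List Int)) (i : Nat), i ∈ List.range (2 ^ dim.toNat) →
      (if done.contains (i : Int) then acc
       else
         if ghgCheckA edges (done ++ [(i : Int)]) then acc ++ ghgGoA dim edges f (done ++ [(i : Int)])
         else acc)
      = acc ++ (if !done.contains (i : Int) && ghgCheckA edges (done ++ [(i : Int)])
          then ghgGoA dim edges f (done ++ [(i : Int)]) else []) := by
    intro acc i _
    cases hc : done.contains (i : Int) <;> cases hk : ghgCheckA edges (done ++ [(i : Int)]) <;>
      simp
  rw [PySem.List.foldl_congr_mem _ _ _ _ hcg]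
  rw [PySem.List.foldl_append_eq_flatMap]
  rfl

-- B's children list as a flatMap of conditional singletons
lemma ghg_children_eq (n : Nat) (eset : PySem.Set (Int × Int)) (byTop : PySem.Dict Int (List (Int × Int)))
    (pre : List Int) (used : PySem.Set Int) :
    ghgChildren n eset byTop pre used
      = (List.range n).flatMap (fun (i : Nat) =>
          if !PySem.Set.contains used (i : Int) && ((byTop.getD (pre.length : Int) []).all (fun e =>
              let v := PySem.List.pyGetD (pre ++ [(i : Int)]) e.1 0
              let w := PySem.List.pyGetD (pre ++ [(i : Int)]) e.2 0
              PySem.Set.contains eset (min v w, max v w)))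
          then [(pre ++ [(i : Int)], PySem.Set.add used (i : Int))] else []) := by
  unfold ghgChildren
  have hcg : ∀ (acc : List (List Int × PySem.Set Int)) (i : Nat), i ∈ List.range n →
      (if PySem.Set.contains used (i : Int) then acc
       else
         if (byTop.getD (pre.length : Int) []).all (fun e =>
             let v := PySem.List.pyGetD (pre ++ [(i : Int)]) e.1 0
             let w := PySem.List.pyGetD (pre ++ [(i : Int)]) e.2 0
             PySem.Set.contains eset (min v w, max v w))
         then acc ++ [(pre ++ [(i : Int)], PySem.Set.add used (i : Int))]
         else acc)
      = acc ++ (if !PySem.Set.contains used (i : Int) && ((byTop.getD (pre.length : Int) []).all (fun e =>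
              let v := PySem.List.pyGetD (pre ++ [(i : Int)]) e.1 0
              let w := PySem.List.pyGetD (pre ++ [(i : Int)]) e.2 0
              PySem.Set.contains eset (min v w, max v w)))
          then [(pre ++ [(i : Int)], PySem.Set.add used (i : Int))] else []) := by
    intro acc i _
    cases hc : PySem.Set.contains used (i : Int) <;>
      cases hk : (byTop.getD (pre.length : Int) []).all (fun e =>
          let v := PySem.List.pyGetD (pre ++ [(i : Int)]) e.1 0
          let w := PySem.List.pyGetD (pre ++ [(i : Int)]) e.2 0
          PySem.Set.contains eset (min v w, max v w)) <;>
      simp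
  rw [PySem.List.foldl_congr_mem _ _ _ _ hcg]
  rw [PySem.List.foldl_append_eq_flatMap]
  rfl

-- expanding a frontier is flatMapping the children
lemma ghg_expand_eq (n : Nat) (eset : PySem.Set (Int × Int)) (byTop : PySem.Dict Int (List (Int × Int)))
    (frontier : List (List Int × PySem.Set Int)) :
    ghgExpand n eset byTop frontier = frontier.flatMap (fun p => ghgChildren n eset byTop p.1 p.2) := by
  unfold ghgExpand
  rw [PySem.List.foldl_append_eq_flatMap]
  rfl

-- per-node step: running A one level deeper below pre = collecting A's results below B's children
lemma ghg_node_step (dim : Int) (edges : List (Int × Int)) (f : Nat) (pre : List Int) (used : PySem.Set Int)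
    (hE : ∀ e ∈ edges, (0 ≤ e.1 ∧ 0 ≤ e.2) ∨ ((pre.length : Int) + 1 ≤ max e.1 e.2))
    (hused : ∀ x : Int, PySem.Set.contains used x = pre.contains x)
    (hchk : ghgCheckA edges pre = true)
    (hlen : (pre.length : Int) ≠ (2 : Int) ^ dim.toNat) :
    (ghgChildren (2 ^ dim.toNat) (PySem.Set.ofList edges)
        (edges.foldl (fun d e => d.modify (max e.1 e.2) [] (· ++ [e])) PySem.Dict.empty) pre used).flatMap
        (fun p => ghgGoA dim edges f p.1)
      = ghgGoA dim edges (f + 1) pre := by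
  rw [ghg_children_eq, ghg_goA_succ dim edges f pre hlen, List.flatMap_assoc]
  apply List.flatMap_congr
  intro i _
  have hcond : (!PySem.Set.contains used (i : Int) &&
      (((edges.foldl (fun d e => d.modify (max e.1 e.2) [] (· ++ [e])) PySem.Dict.empty).getD (pre.length : Int) []).all (fun e =>
          let v := PySem.List.pyGetD (pre ++ [(i : Int)]) e.1 0
          let w := PySem.List.pyGetD (pre ++ [(i : Int)]) e.2 0
          PySem.Set.contains (PySem.Set.ofList edges) (min v w, max v w))))
      = (!pre.contains (i : Int) && ghgCheckA edges (pre ++ [(i : Int)])) := by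
    rw [hused, ghg_incident_eq, ghg_check_split _ _ _ hE, hchk, Bool.true_and]
  rw [hcond]
  split <;> simp

-- main BFS invariant: a frontier of valid same-length prefixes with matching used-sets, run for the
-- remaining fuel, yields exactly the concatenation of A's searches below its members
lemma ghg_mainB (dim : Int) (edges : List (Int × Int))
    (hE : ∀ e ∈ edges, (0 ≤ e.1 ∧ 0 ≤ e.2) ∨ ((2 : Int) ^ dim.toNat ≤ max e.1 e.2)) :
    ∀ (f : Nat) (frontier : List (List Int × PySem.Set Int)) (k : Nat),
      (∀ p ∈ frontier,
        (∀ x : Int, PySem.Set.contains p.2 x = p.1.contains x) ∧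
        ghgCheckA edges p.1 = true ∧ p.1.length + f = 2 ^ dim.toNat) →
      (if (ghgLoopB (2 ^ dim.toNat) (PySem.Set.ofList edges)
            (edges.foldl (fun d e => d.modify (max e.1 e.2) [] (· ++ [e])) PySem.Dict.empty) f k frontier).1 = k + f
       then ((ghgLoopB (2 ^ dim.toNat) (PySem.Set.ofList edges)
            (edges.foldl (fun d e => d.modify (max e.1 e.2) [] (· ++ [e])) PySem.Dict.empty) f k frontier).2).map (fun p => p.1)
       else [])
      = frontier.flatMap (fun p => ghgGoA dim edges f p.1) := by
  have hcast : ((2 ^ dim.toNat : Nat) : Int) = (2 : Int) ^ dim.toNat := by push_cast; ring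
  intro f
  induction f with
  | zero =>
    intro frontier k hinv
    rw [ghgLoopB]
    simp only [Nat.add_zero, if_true]
    rw [List.map_eq_flatMap]
    apply List.flatMap_congr
    intro p hp
    obtain ⟨-, -, hplen⟩ := hinv p hp
    rw [ghgGoA, if_pos (by rw [← hcast, Nat.cast_inj]; omega)]
  | succ f ih =>
    intro frontier k hinv
    rw [ghgLoopB]
    by_cases hfe : frontier = []
    · subst hfe
      rw [if_pos rfl]
      simp
    · rw [if_neg hfe]
      have hstep : ∀ p ∈ frontier,
          (ghgChildren (2 ^ dim.toNat) (PySem.Set.ofList edges)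
            (edges.foldl (fun d e => d.modify (max e.1 e.2) [] (· ++ [e])) PySem.Dict.empty) p.1 p.2).flatMap
            (fun q => ghgGoA dim edges f q.1)
          = ghgGoA dim edges (f + 1) p.1 := by
        intro p hp
        obtain ⟨hused, hchk, hplen⟩ := hinv p hp
        apply ghg_node_step dim edges f p.1 p.2 _ hused hchk
        · rw [← hcast, Nat.cast_inj.ne]; omega
        · intro e he
          rcases hE e he with h | h
          · exact Or.inl h
          · right; omega
      have hchild : ∀ q ∈ ghgExpand (2 ^ dim.toNat) (PySem.Set.ofList edges)
            (edges.foldl (fun d e => d.modify (max e.1 e.2) [] (· ++ [e])) PySem.Dict.empty) frontier,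
          (∀ x : Int, PySem.Set.contains q.2 x = q.1.contains x) ∧
          ghgCheckA edges q.1 = true ∧ q.1.length + f = 2 ^ dim.toNat := by
        intro q hq
        rw [ghg_expand_eq, List.mem_flatMap] at hq
        obtain ⟨p, hp, hqp⟩ := hq
        obtain ⟨hused, hchk, hplen⟩ := hinv p hp
        rw [ghg_children_eq, List.mem_flatMap] at hqp
        obtain ⟨i, hi, hqi⟩ := hqp
        by_cases hcond : (!PySem.Set.contains p.2 (i : Int) && (((edges.foldl (fun d e => d.modify (max e.1 e.2) [] (· ++ [e])) PySem.Dict.empty).getD (p.1.length : Int) []).all (fun e =>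
              let v := PySem.List.pyGetD (p.1 ++ [(i : Int)]) e.1 0
              let w := PySem.List.pyGetD (p.1 ++ [(i : Int)]) e.2 0
              PySem.Set.contains (PySem.Set.ofList edges) (min v w, max v w))))
        · rw [if_pos hcond, List.mem_singleton] at hqi
          subst hqi
          have hE1 : ∀ e ∈ edges, (0 ≤ e.1 ∧ 0 ≤ e.2) ∨ ((p.1.length : Int) + 1 ≤ max e.1 e.2) := by
            intro e he
            rcases hE e he with h | h
            · exact Or.inl h
            · right; omega
          rcases Bool.and_eq_true_iff.mp hcond with ⟨hnc, hinc⟩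
          refine ⟨?_, ?_, by simp; omega⟩
          · intro x
            rw [ghg_contains_add, hused x]
            cases hx : p.1.contains x <;> cases hxy : x == (i : Int) <;> simp_all
          · rw [ghg_check_split _ _ _ hE1, hchk, Bool.true_and, ← ghg_incident_eq]
            exact hinc
        · rw [if_neg hcond] at hqi
          simp at hqi
      have := ih (ghgExpand (2 ^ dim.toNat) (PySem.Set.ofList edges)
            (edges.foldl (fun d e => d.modify (max e.1 e.2) [] (· ++ [e])) PySem.Dict.empty) frontier) (k + 1) hchild
      rw [show k + 1 + f = k + (f + 1) by omega] at this
      rw [this, ghg_expand_eq, List.flatMap_assoc]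
      exact List.flatMap_congr hstep

-- ===== VERDICT (by name: the statement is the Claim_ definition above) =====
theorem generate_hyperoctahedral_group_spec : Claim_equal_generate_hyperoctahedral_group := by
  unfold Claim_equal_generate_hyperoctahedral_group
  intro dim edges done _ hPre
  obtain ⟨hdim, hE⟩ := hPre
  unfold Spec_generate_hyperoctahedral_group
  unfold generate_hyperoctahedral_group generate_hyperoctahedral_group_alt
  have hcast : ((2 ^ dim.toNat : Nat) : Int) = (2 : Int) ^ dim.toNat := by push_cast; ring
  by_cases hL : done.length = 2 ^ dim.toNat
  · rw [if_pos hL]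
    cases hfuel : 2 ^ dim.toNat - done.length <;>
      rw [ghgGoA, if_pos (by rw [← hcast, Nat.cast_inj]; exact hL)]
  · rw [if_neg hL]
    have hLi : (done.length : Int) ≠ (2 : Int) ^ dim.toNat := by rw [← hcast]; exact_mod_cast hL
    have hPrev : (edges.all (fun e =>
        if max e.1 e.2 < (done.length : Int) then
          let v := PySem.List.pyGetD done e.1 0
          let w := PySem.List.pyGetD done e.2 0
          PySem.Set.contains (PySem.Set.ofList edges) (min v w, max v w)
        else true)) = ghgCheckA edges done := by
      unfold ghgCheckA
      apply ghg_all_congr_mem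
      intro e _
      by_cases hg : max e.1 e.2 < (done.length : Int)
      · rw [if_pos hg, if_pos hg]
        simp only [ghg_set_contains]
      · rw [if_neg hg, if_neg hg]
    by_cases hle : done.length ≤ 2 ^ dim.toNat
    · -- the prefix is shorter than 2^dim: the BFS runs for exactly 2^dim - len(done) levels
      have hone : (1 : Int) ≤ (2 : Int) ^ dim.toNat := one_le_pow₀ (by omega)
      have hE1 : ∀ e ∈ edges, (0 ≤ e.1 ∧ 0 ≤ e.2) ∨ ((done.length : Int) + 1 ≤ max e.1 e.2) := by
        intro e he
        rcases hE e he with h | h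
        · exact Or.inl h
        · right; omega
      have hEn : ∀ e ∈ edges, (0 ≤ e.1 ∧ 0 ≤ e.2) ∨ ((2 : Int) ^ dim.toNat ≤ max e.1 e.2) := by
        intro e he
        rcases hE e he with h | h
        · exact Or.inl h
        · right
          have h0 : (0 : Int) ≤ (done.length : Int) := by positivity
          omega
      by_cases hchk : ghgCheckA edges done = true
      · rw [if_pos (by rw [hPrev]; exact hchk)]
        have hmain := ghg_mainB dim edges hEn (2 ^ dim.toNat - done.length)
          [(done, PySem.Set.ofList done)] done.length
          (by
            intro p hp
            rw [List.mem_singleton] at hp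
            subst hp
            refine ⟨fun x => ghg_set_contains done x, hchk, ?_⟩
            simp only
            omega)
        rw [show done.length + (2 ^ dim.toNat - done.length) = 2 ^ dim.toNat by omega] at hmain
        rw [hmain]
        simp
      · rw [if_neg (by rw [hPrev]; exact hchk)]
        exact ghg_goA_of_check_false dim edges _ done hE1 hLi
          (by revert hchk; cases ghgCheckA edges done <;> simp)
    · -- the prefix is longer than 2^dim: fuel is 0 and both sides return nothing
      have hf : 2 ^ dim.toNat - done.length = 0 := Nat.sub_eq_zero_of_le (by omega)
      rw [hf]
      by_cases hP : (edges.all (fun e =>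
          if max e.1 e.2 < (done.length : Int) then
            let v := PySem.List.pyGetD done e.1 0
            let w := PySem.List.pyGetD done e.2 0
            PySem.Set.contains (PySem.Set.ofList edges) (min v w, max v w)
          else true)) = true
      · rw [if_pos hP, ghgGoA, if_neg hLi]
        simp only [ghgLoopB]
        rw [if_neg (by simpa using hL)]
      · rw [if_neg hP, ghgGoA, if_neg hLi]
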